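-- pv_equiv track=rewrite | github.com/mafir03/pyMania | kuliah/cosineSimillarity.py | multipy_and_squared_part
-- ===== SOURCE A (Python) =====
-- def multipy_and_squared_part(dict_a, dict_b):
--     # it's guaranteed for dict_a and dict_b to have equal length
--     # and same sets of keys but different items
--     top_part_of_equation = int()
--     bottom_part_dict_a = int()
--     bottom_part_dict_b = int()
--     for keys in dict_a:
--         top_part_of_equation += dict_a[keys] * dict_b[keys]
--         bottom_part_dict_a += dict_a[keys]**2
--         bottom_part_dict_b += dict_b[keys]**2
--
--     return top_part_of_equation, bottom_part_dict_a * bottom_part_dict_b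
-- ===== SOURCE B (Python) =====
-- def multipy_and_squared_part(dict_a, dict_b):
--     # sort both item lists by key, then a single two-pointer merge pairs each
--     # entry of dict_a with its counterpart in dict_b (no hash lookups)
--     a = sorted(dict_a.items())
--     b = sorted(dict_b.items())
--     top = sa = sb = 0
--     j = 0
--     for k, x in a:
--         while b[j][0] < k:
--             j += 1
--         y = b[j][1]
--         top += x * y
--         sa += x * x
--         sb += y * y
--     return top, sa * sb
-- ===== Notes on version B (the rewrite author's own statement) =====
-- stated objective: alternative
-- what changed: Replaces the hash-lookup loop (for each key of dict_a, three dict indexings) by sorting both item lists by key and pairing the values with a single two-pointer merge scan.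
import Mathlib
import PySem

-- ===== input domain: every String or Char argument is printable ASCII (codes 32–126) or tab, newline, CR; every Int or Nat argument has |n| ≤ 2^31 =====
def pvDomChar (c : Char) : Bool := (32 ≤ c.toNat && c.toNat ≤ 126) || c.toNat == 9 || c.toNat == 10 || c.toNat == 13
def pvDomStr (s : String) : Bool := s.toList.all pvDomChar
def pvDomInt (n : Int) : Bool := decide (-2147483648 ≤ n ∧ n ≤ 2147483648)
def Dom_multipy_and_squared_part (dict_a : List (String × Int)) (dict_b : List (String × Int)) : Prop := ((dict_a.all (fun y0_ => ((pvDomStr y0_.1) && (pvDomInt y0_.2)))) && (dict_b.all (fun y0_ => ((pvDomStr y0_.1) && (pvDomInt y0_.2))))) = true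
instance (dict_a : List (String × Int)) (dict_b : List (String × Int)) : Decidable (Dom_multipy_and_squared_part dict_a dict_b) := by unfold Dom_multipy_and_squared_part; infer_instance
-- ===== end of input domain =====

-- B replaces A's per-key dict lookups by sorting both item lists and a two-pointer merge scan.

-- ===== PORT A =====
-- one loop over dict_a's keys, three dict indexings per key, three accumulators
def multipy_and_squared_part (dict_a : List (String × Int)) (dict_b : List (String × Int)) : Int × Int :=
  let da := PySem.Dict.ofList dict_a
  let db := PySem.Dict.ofList dict_b
  let st := da.keys.foldl
    (fun (st : Int × Int × Int) k =>
      (st.1 + da.getD k 0 * db.getD k 0,          -- dict_a[keys] * dict_b[keys]; KeyError (key missing in db) excluded by Pre_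
       st.2.1 + (da.getD k 0) ^ 2,
       st.2.2 + (db.getD k 0) ^ 2))
    (0, 0, 0)
  (st.1, st.2.1 * st.2.2)

-- ===== PORT B =====
-- the for-loop with the inner `while b[j][0] < k: j += 1` pointer: bs is the suffix of b from j on;
-- the while loop is the dropWhile; `b[j][1]` is the head's value (IndexError when no key ≥ k — outside Pre_, headD default)
def pvMergeB : List (String × Int) → List (String × Int) → Int × Int × Int → Int × Int × Int
  | _, [], acc => acc
  | bs, (k, x) :: as, (t, sa, sb) =>
    let bs' := bs.dropWhile (fun p => decide (p.1 < k))
    let y := (bs'.headD ("", 0)).2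
    pvMergeB bs' as (t + x * y, sa + x * x, sb + y * y)

-- sorted(items): Python compares the (key, value) tuples, but a dict's keys are unique, so this is sorting by key (exact here)
def multipy_and_squared_part_alt (dict_a : List (String × Int)) (dict_b : List (String × Int)) : Int × Int :=
  let a := PySem.List.sorted (PySem.Dict.ofList dict_a).items (fun p => p.1) false
  let b := PySem.List.sorted (PySem.Dict.ofList dict_b).items (fun p => p.1) false
  let st := pvMergeB b a (0, 0, 0)
  (st.1, st.2.1 * st.2.2)

-- ===== PRECONDITION & SPEC =====
-- Pre_ excludes exactly the inputs where Python A raises KeyError: a key of dict_a missing from dict_b.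
def Pre_multipy_and_squared_part (dict_a : List (String × Int)) (dict_b : List (String × Int)) : Prop :=
  ∀ k ∈ dict_a.map Prod.fst, k ∈ dict_b.map Prod.fst
instance (dict_a : List (String × Int)) (dict_b : List (String × Int)) : Decidable (Pre_multipy_and_squared_part dict_a dict_b) := by unfold Pre_multipy_and_squared_part; infer_instance
def pvWitness_multipy_and_squared_part : (List (String × Int)) × (List (String × Int)) :=
  ([("a", 1), ("b", 2)], [("a", 3), ("b", 4)])
def Spec_multipy_and_squared_part (dict_a : List (String × Int)) (dict_b : List (String × Int)) (out : Int × Int) : Prop := out = multipy_and_squared_part_alt dict_a dict_b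
instance (dict_a : List (String × Int)) (dict_b : List (String × Int)) (out : Int × Int) : Decidable (Spec_multipy_and_squared_part dict_a dict_b out) := by unfold Spec_multipy_and_squared_part; infer_instance

-- ===== CLAIM (what is proved, stated in full; the proofs are below) =====
def Claim_equal_multipy_and_squared_part : Prop := ∀ (dict_a : List (String × Int)) (dict_b : List (String × Int)), Dom_multipy_and_squared_part dict_a dict_b → Pre_multipy_and_squared_part dict_a dict_b → Spec_multipy_and_squared_part dict_a dict_b (multipy_and_squared_part dict_a dict_b)

-- ===== LEMMAS AND PROOFS =====

-- A's fused triple-accumulator loop equals three separate sums over the keys.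
lemma foldl_triple (f g h : String → Int) (ks : List String) (t ba bb : Int) :
    ks.foldl (fun (st : Int × Int × Int) k => (st.1 + f k, st.2.1 + g k, st.2.2 + h k)) (t, ba, bb)
      = (t + (ks.map f).sum, ba + (ks.map g).sum, bb + (ks.map h).sum) := by
  induction ks generalizing t ba bb with
  | nil => simp
  | cons x xs ih => simp [ih]; refine ⟨by ring, by ring, by ring⟩

-- on a key-strictly-sorted list containing k, dropWhile (< k) starts exactly at k's entry
lemma dropWhile_head_of_mem (bs : List (String × Int)) (k : String)
    (hs : bs.Pairwise (fun p q => p.1 < q.1)) (hk : k ∈ bs.map Prod.fst) :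
    ∃ v rest, bs.dropWhile (fun p => decide (p.1 < k)) = (k, v) :: rest := by
  induction bs with
  | nil => simp at hk
  | cons p t ih =>
    rcases p with ⟨k0, v0⟩
    rcases List.pairwise_cons.mp hs with ⟨hlt, ht⟩
    by_cases h0 : k0 < k
    · have hk' : k ∈ t.map Prod.fst := by
        rcases List.mem_map.mp hk with ⟨q, hq, hqe⟩
        rcases List.mem_cons.mp hq with rfl | hq'
        · exact absurd hqe (ne_of_lt h0)
        · exact List.mem_map.mpr ⟨q, hq', hqe⟩
      rcases ih ht hk' with ⟨v, rest, hr⟩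
      exact ⟨v, rest, by simpa [List.dropWhile, h0] using hr⟩
    · have hk0 : k = k0 := by
        rcases List.mem_map.mp hk with ⟨q, hq, hqe⟩
        rcases List.mem_cons.mp hq with rfl | hq'
        · exact hqe.symm
        · exact absurd (hqe ▸ hlt q hq') h0
      subst hk0
      exact ⟨v0, t, by simp [List.dropWhile]⟩

-- a key greater than k survives dropWhile (< k)
lemma mem_keys_dropWhile (bs : List (String × Int)) (k k' : String) (hgt : k < k')
    (hk : k' ∈ bs.map Prod.fst) :
    k' ∈ (bs.dropWhile (fun p => decide (p.1 < k))).map Prod.fst := by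
  rcases List.mem_map.mp hk with ⟨q, hq, hqe⟩
  rw [← List.takeWhile_append_dropWhile (p := fun (p : String × Int) => decide (p.1 < k)) (l := bs)] at hq
  rcases List.mem_append.mp hq with hq' | hq'
  · have hlt2 : q.1 < k := of_decide_eq_true (List.mem_takeWhile_imp (p := fun (p : String × Int) => decide (p.1 < k)) hq')
    exact absurd (hqe ▸ hlt2) (not_lt.mpr (le_of_lt hgt))
  · exact List.mem_map.mpr ⟨q, hq', hqe⟩

-- the merge loop computes the three sums, values looked up in db
lemma merge_eq (db : PySem.Dict String Int) (hnd : db.keys.Nodup) :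
    ∀ (as bs : List (String × Int)) (t sa sb : Int),
      bs.Pairwise (fun p q => p.1 < q.1) →
      (∀ p ∈ bs, p ∈ db.items) →
      as.Pairwise (fun p q => p.1 < q.1) →
      (∀ p ∈ as, p.1 ∈ bs.map Prod.fst) →
      pvMergeB bs as (t, sa, sb) =
        (t + (as.map (fun p => p.2 * db.getD p.1 0)).sum,
         sa + (as.map (fun p => p.2 * p.2)).sum,
         sb + (as.map (fun p => db.getD p.1 0 * db.getD p.1 0)).sum) := by
  intro as
  induction as with
  | nil => intro bs t sa sb _ _ _ _; simp [pvMergeB]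
  | cons p as ih =>
    rcases p with ⟨k, x⟩
    intro bs t sa sb hbs hbm has hks
    rcases List.pairwise_cons.mp has with ⟨hka, has'⟩
    rcases dropWhile_head_of_mem bs k hbs (hks (k, x) (by simp)) with ⟨v, rest, hr⟩
    have hsub : ((k, v) :: rest).Sublist bs := hr ▸ List.dropWhile_sublist _
    have hbs' : ((k, v) :: rest).Pairwise (fun p q => p.1 < q.1) := hbs.sublist hsub
    have hbm' : ∀ p ∈ (k, v) :: rest, p ∈ db.items := fun p hp => hbm p (hsub.mem hp)
    have hv : db.getD k 0 = v :=
      PySem.Dict.getD_of_mem_items db (hbm' (k, v) (by simp)) hnd 0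
    have hks' : ∀ p ∈ as, p.1 ∈ ((k, v) :: rest).map Prod.fst := by
      intro p hp
      have := mem_keys_dropWhile bs k p.1 (hka p hp) (hks p (by simp [hp]))
      rwa [hr] at this
    have hrec := ih ((k, v) :: rest) (t + x * v) (sa + x * x) (sb + v * v) hbs' hbm' has' hks'
    simp only [pvMergeB, hr, List.headD]
    simp only [hrec, List.map_cons, List.sum_cons, hv]
    refine Prod.ext ?_ (Prod.ext ?_ ?_) <;> simp <;> ring

-- strict key order on a sorted items list with Nodup keys
lemma sorted_items_strict (d : PySem.Dict String Int) (hnd : d.keys.Nodup) :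
    (PySem.List.sorted d.items (fun p => p.1) false).Pairwise (fun p q => p.1 < q.1) := by
  have hle := PySem.List.sorted_pairwise d.items (fun p => p.1)
  have hperm : (PySem.List.sorted d.items (fun p => p.1) false).Perm d.items :=
    PySem.List.sorted_perm _ _ _
  have hnd' : ((PySem.List.sorted d.items (fun p => p.1) false).map Prod.fst).Nodup := by
    have : (d.items.map Prod.fst).Nodup := hnd
    exact ((hperm.map Prod.fst).nodup_iff).mpr this
  have hne : (PySem.List.sorted d.items (fun p => p.1) false).Pairwise
      (fun p q => p.1 ≠ q.1) := List.pairwise_map.mp hnd'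
  exact (hle.and hne).imp (fun h => lt_of_le_of_ne h.1 h.2)

-- keys of Dict.ofList are the keys occurring in the list
lemma mem_keys_ofList_iff (l : List (String × Int)) (k : String) :
    k ∈ (PySem.Dict.ofList l).keys ↔ k ∈ l.map Prod.fst := by
  have h : PySem.Dict.ofList l = l.foldl (fun d (p : String × Int) => d.insert p.1 p.2) PySem.Dict.empty := rfl
  rw [h, PySem.Dict.keys_foldl_insert_key]
  simp [PySem.Set.mem_update, PySem.Dict.keys_empty]

theorem multipy_and_squared_part_eq (dict_a dict_b : List (String × Int))
    (hpre : Pre_multipy_and_squared_part dict_a dict_b) :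
    multipy_and_squared_part dict_a dict_b = multipy_and_squared_part_alt dict_a dict_b := by
  have hnda : (PySem.Dict.ofList dict_a).keys.Nodup := PySem.Dict.nodup_keys_ofList dict_a
  have hndb : (PySem.Dict.ofList dict_b).keys.Nodup := PySem.Dict.nodup_keys_ofList dict_b
  set da := PySem.Dict.ofList dict_a with hda
  set db := PySem.Dict.ofList dict_b with hdb
  set a := PySem.List.sorted da.items (fun p => p.1) false with ha
  set b := PySem.List.sorted db.items (fun p => p.1) false with hb
  have haperm : a.Perm da.items := PySem.List.sorted_perm _ _ _
  have hbperm : b.Perm db.items := PySem.List.sorted_perm _ _ _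
  have hbm : ∀ p ∈ b, p ∈ db.items := fun p hp => hbperm.mem_iff.mp hp
  have hks : ∀ p ∈ a, p.1 ∈ b.map Prod.fst := by
    intro p hp
    have h1 : p ∈ da.items := haperm.mem_iff.mp hp
    have h2 : p.1 ∈ da.keys := List.mem_map.mpr ⟨p, h1, rfl⟩
    have h5 : p.1 ∈ db.keys := (mem_keys_ofList_iff dict_b p.1).mpr (hpre p.1 ((mem_keys_ofList_iff dict_a p.1).mp h2))
    exact ((hbperm.map Prod.fst).mem_iff).mpr h5
  have hmerge := merge_eq db hndb a b 0 0 0 (sorted_items_strict db hndb) hbm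
    (sorted_items_strict da hnda) hks
  have hval : ∀ p ∈ a, p.2 = da.getD p.1 0 := by
    rintro ⟨k, v⟩ hp
    exact (PySem.Dict.getD_of_mem_items da (haperm.mem_iff.mp hp) hnda 0).symm
  -- the three merge sums, as sums of key-functions over a's keys
  have hkeyperm : (a.map Prod.fst).Perm da.keys := haperm.map Prod.fst
  have hsum : ∀ F : String → Int, (a.map (fun p => F p.1)).sum = (da.keys.map F).sum := by
    intro F
    rw [show (fun (p : String × Int) => F p.1) = F ∘ Prod.fst from rfl, ← List.map_map]
    exact (hkeyperm.map F).sum_eq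
  have h1' : (a.map (fun p => p.2 * db.getD p.1 0)).sum
      = (da.keys.map (fun k => da.getD k 0 * db.getD k 0)).sum := by
    have e : a.map (fun p => p.2 * db.getD p.1 0)
        = a.map (fun p => da.getD p.1 0 * db.getD p.1 0) :=
      List.map_congr_left (fun p hp => by rw [hval p hp])
    rw [e]; exact hsum (fun k => da.getD k 0 * db.getD k 0)
  have h2 : (a.map (fun p => p.2 * p.2)).sum
      = (da.keys.map (fun k => (da.getD k 0) ^ 2)).sum := by
    have e : a.map (fun p => p.2 * p.2) = a.map (fun p => (da.getD p.1 0) ^ 2) :=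
      List.map_congr_left (fun p hp => by rw [hval p hp]; ring)
    rw [e]; exact hsum (fun k => (da.getD k 0) ^ 2)
  have h3 : (a.map (fun p => db.getD p.1 0 * db.getD p.1 0)).sum
      = (da.keys.map (fun k => (db.getD k 0) ^ 2)).sum := by
    have e : a.map (fun p => db.getD p.1 0 * db.getD p.1 0)
        = a.map (fun p => (db.getD p.1 0) ^ 2) :=
      List.map_congr_left (fun p _ => by ring)
    rw [e]; exact hsum (fun k => (db.getD k 0) ^ 2)
  simp only [multipy_and_squared_part, multipy_and_squared_part_alt, foldl_triple,
    ← hda, ← hdb, ← ha, ← hb, hmerge, h1', h2, h3, zero_add]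

-- ===== VERDICT (by name: the statement is the Claim_ definition above) =====
theorem multipy_and_squared_part_spec : Claim_equal_multipy_and_squared_part := by
  intro dict_a dict_b _ hpre
  unfold Spec_multipy_and_squared_part
  exact multipy_and_squared_part_eq dict_a dict_b hpre
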